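-- pv_equiv track=rewrite | github.com/randomshit699/Bncr_plugins | 其他/scanShopId.py | getShopId
-- ===== SOURCE A (Python) =====
-- def getShopId(
--     start_id,
-- ):
--     d = start_id
--     while d > 0:
--         if d < 10000:
--             raise ValueError("at least 10000")
--         elif d < 218900:
--             for i in range(d, 218900):
--                 yield i
--             d = 529000
--         elif (
--             d >= 529000 and d < 559000
--         ):
--             for i in range(d, 559000):
--                 yield i
--             d = 564000
--         elif d >= 564000 and d < 1000000:
--             for i in range(d, 1000000):
--                 yield i
--             d = 10000000
--         elif d >= 10000000 and d < 12280000: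
--             for i in range(d, 12280000):
--                 yield i
--             d = 1000000000
--         elif d >= 1000000000 and d < 1000600000:
--             for i in range(d, 1000600000):
--                 yield i
--             d = -1  # 跳出循环，会raise StopIteration
--         else:
--             raise ValueError("end")
-- ===== SOURCE B (Python) =====
-- # Rank-space rewrite: valid shop IDs are mapped bijectively onto the contiguous
-- # rank interval [0, 3554900); B runs one flat loop over ranks and converts each
-- # rank back to an ID with constant arithmetic (no per-segment range chunks).
--
-- def _rank(x):
--     # inverse of _unrank on the valid IDs; None if x is not a valid ID
--     if 10000 <= x < 218900:
--         return x - 10000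
--     if 529000 <= x < 559000:
--         return x - 320100
--     if 564000 <= x < 1000000:
--         return x - 325100
--     if 10000000 <= x < 12280000:
--         return x - 9325100
--     if 1000000000 <= x < 1000600000:
--         return x - 997045100
--     return None
--
-- def _unrank(k):
--     if k < 208900:
--         return k + 10000
--     if k < 238900:
--         return k + 320100
--     if k < 674900:
--         return k + 325100
--     if k < 2954900:
--         return k + 9325100
--     return k + 997045100
--
-- def getShopId(start_id):
--     if start_id <= 0:
--         return
--     r = _rank(start_id)
--     if r is None:
--         raise ValueError("at least 10000" if start_id < 10000 else "end")
--     for k in range(r, 3554900):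
--         yield _unrank(k)
-- ===== Notes on version B (the rewrite author's own statement) =====
-- stated objective: alternative
-- what changed: Replaced A's while-loop state machine that drains hard-coded range blocks by a rank/unrank bijection: valid IDs map to a contiguous rank interval [0,3554900), and B is one flat loop over ranks converting each rank back to an ID arithmetically.
import Mathlib
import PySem

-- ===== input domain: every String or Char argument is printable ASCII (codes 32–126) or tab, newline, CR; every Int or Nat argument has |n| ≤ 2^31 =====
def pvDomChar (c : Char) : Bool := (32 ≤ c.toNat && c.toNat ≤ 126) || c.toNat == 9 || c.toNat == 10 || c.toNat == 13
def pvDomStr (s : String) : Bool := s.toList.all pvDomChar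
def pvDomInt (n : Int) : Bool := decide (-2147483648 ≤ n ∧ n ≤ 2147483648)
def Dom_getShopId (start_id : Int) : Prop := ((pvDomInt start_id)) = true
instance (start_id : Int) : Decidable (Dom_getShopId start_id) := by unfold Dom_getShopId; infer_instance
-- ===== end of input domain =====

-- B replaces A's while-loop state machine over hard-coded range blocks by a rank/unrank
-- bijection onto the contiguous rank interval [0, 3554900) and one flat loop over ranks
-- (objective: alternative). Both are generators in Python; equivalence is about the
-- full list of yielded values.

-- ===== PORT A =====
-- A's while-loop: d moves along a fixed chain of at most 6 states, so fuel 6 is exact.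
-- Where Python raises (ValueError) the port returns the values yielded so far; Pre_ excludes those inputs.
def getShopIdLoop (fuel : Nat) (d : Int) (acc : List Int) : List Int :=
  match fuel with
  | 0 => acc
  | fuel + 1 =>
    if d > 0 then
      if d < 10000 then acc  -- raise ValueError("at least 10000")
      else if d < 218900 then
        getShopIdLoop fuel 529000 (acc ++ PySem.List.pyRange d 218900 1)
      else if 529000 ≤ d ∧ d < 559000 then
        getShopIdLoop fuel 564000 (acc ++ PySem.List.pyRange d 559000 1)
      else if 564000 ≤ d ∧ d < 1000000 then
        getShopIdLoop fuel 10000000 (acc ++ PySem.List.pyRange d 1000000 1)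
      else if 10000000 ≤ d ∧ d < 12280000 then
        getShopIdLoop fuel 1000000000 (acc ++ PySem.List.pyRange d 12280000 1)
      else if 1000000000 ≤ d ∧ d < 1000600000 then
        getShopIdLoop fuel (-1) (acc ++ PySem.List.pyRange d 1000600000 1)
      else acc  -- raise ValueError("end")
    else acc

def getShopId (start_id : Int) : List Int :=
  getShopIdLoop 6 start_id []

-- ===== PORT B =====
-- _rank: inverse of _unrank on the valid IDs; none if x is not a valid ID
def getShopIdRank? (x : Int) : Option Int :=
  if 10000 ≤ x ∧ x < 218900 then some (x - 10000)
  else if 529000 ≤ x ∧ x < 559000 then some (x - 320100)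
  else if 564000 ≤ x ∧ x < 1000000 then some (x - 325100)
  else if 10000000 ≤ x ∧ x < 12280000 then some (x - 9325100)
  else if 1000000000 ≤ x ∧ x < 1000600000 then some (x - 997045100)
  else none

-- _unrank: rank back to ID, constant arithmetic per rank band
def getShopIdUnrank (k : Int) : Int :=
  if k < 208900 then k + 10000
  else if k < 238900 then k + 320100
  else if k < 674900 then k + 325100
  else if k < 2954900 then k + 9325100
  else k + 997045100

def getShopId_alt (start_id : Int) : List Int :=
  if start_id ≤ 0 then []
  else
    match getShopIdRank? start_id with
    | none => []  -- raise ValueError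
    | some r => (PySem.List.pyRange r 3554900 1).map getShopIdUnrank

-- ===== PRECONDITION & SPEC =====
-- Pre_ excludes exactly the inputs on which iterating A raises ValueError:
-- 0 < start_id < 10000 and the gaps between / beyond the five ID windows.
def Pre_getShopId (start_id : Int) : Prop :=
  start_id ≤ 0 ∨ (10000 ≤ start_id ∧ start_id < 218900) ∨
  (529000 ≤ start_id ∧ start_id < 559000) ∨ (564000 ≤ start_id ∧ start_id < 1000000) ∨
  (10000000 ≤ start_id ∧ start_id < 12280000) ∨
  (1000000000 ≤ start_id ∧ start_id < 1000600000)
instance (start_id : Int) : Decidable (Pre_getShopId start_id) := by unfold Pre_getShopId; infer_instance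

def pvWitness_getShopId : Int := 1000599998

def Spec_getShopId (start_id : Int) (out : List Int) : Prop := out = getShopId_alt start_id
instance (start_id : Int) (out : List Int) : Decidable (Spec_getShopId start_id out) := by unfold Spec_getShopId; infer_instance

-- ===== CLAIM =====
def Claim_equal_getShopId : Prop := ∀ (start_id : Int), Dom_getShopId start_id → Pre_getShopId start_id → Spec_getShopId start_id (getShopId start_id)

-- ===== LEMMAS AND PROOFS =====
-- A-side: after the first (symbolic) iteration d is a constant; the rest evaluates by rfl.
theorem loop5_529000 (acc : List Int) : getShopIdLoop 5 529000 acc =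
    acc ++ PySem.List.pyRange 529000 559000 1 ++ PySem.List.pyRange 564000 1000000 1 ++
    PySem.List.pyRange 10000000 12280000 1 ++ PySem.List.pyRange 1000000000 1000600000 1 := rfl

theorem loop5_564000 (acc : List Int) : getShopIdLoop 5 564000 acc =
    acc ++ PySem.List.pyRange 564000 1000000 1 ++
    PySem.List.pyRange 10000000 12280000 1 ++ PySem.List.pyRange 1000000000 1000600000 1 := rfl

theorem loop5_1e7 (acc : List Int) : getShopIdLoop 5 10000000 acc =
    acc ++ PySem.List.pyRange 10000000 12280000 1 ++ PySem.List.pyRange 1000000000 1000600000 1 := rfl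

theorem loop5_neg (acc : List Int) : getShopIdLoop 5 (-1) acc = acc := rfl

theorem loop4_1e9 (acc : List Int) : getShopIdLoop 5 1000000000 acc =
    acc ++ PySem.List.pyRange 1000000000 1000600000 1 := rfl

theorem loop_unfold_6 (d : Int) (acc : List Int) : getShopIdLoop 6 d acc =
    if d > 0 then
      if d < 10000 then acc
      else if d < 218900 then
        getShopIdLoop 5 529000 (acc ++ PySem.List.pyRange d 218900 1)
      else if 529000 ≤ d ∧ d < 559000 then
        getShopIdLoop 5 564000 (acc ++ PySem.List.pyRange d 559000 1)
      else if 564000 ≤ d ∧ d < 1000000 then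
        getShopIdLoop 5 10000000 (acc ++ PySem.List.pyRange d 1000000 1)
      else if 10000000 ≤ d ∧ d < 12280000 then
        getShopIdLoop 5 1000000000 (acc ++ PySem.List.pyRange d 12280000 1)
      else if 1000000000 ≤ d ∧ d < 1000600000 then
        getShopIdLoop 5 (-1) (acc ++ PySem.List.pyRange d 1000600000 1)
      else acc
    else acc := rfl

-- B-side: shifting a rank range by a constant gives an ID range
theorem map_shift (a b δ : Int) :
    (PySem.List.pyRange a b 1).map (fun k => k + δ) = PySem.List.pyRange (a + δ) (b + δ) 1 := by
  rw [PySem.List.pyRange_one, PySem.List.pyRange_one, List.map_map]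
  have h : b + δ - (a + δ) = b - a := by ring
  rw [h]
  exact List.map_congr_left (fun k _ => by simp [Function.comp]; ring)

-- on a rank band where unrank is k + δ, mapping unrank over the band is a shift
theorem map_unrank_chunk (a b δ : Int)
    (h : ∀ x, a ≤ x → x < b → getShopIdUnrank x = x + δ) :
    (PySem.List.pyRange a b 1).map getShopIdUnrank = PySem.List.pyRange (a + δ) (b + δ) 1 := by
  rw [← map_shift]
  exact List.map_congr_left (fun x hx => by
    rw [PySem.List.mem_pyRange_one] at hx; exact h x hx.1 hx.2)

-- ===== VERDICT =====
theorem getShopId_spec : Claim_equal_getShopId := by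
  intro s _ hpre
  unfold Spec_getShopId getShopId getShopId_alt getShopIdRank?
  rw [loop_unfold_6]
  rcases hpre with h | h | h | h | h | h
  · rw [if_neg (by omega : ¬ s > 0), if_pos (by omega : s ≤ 0)]
  · -- s ∈ [10000, 218900), rank s - 10000 ∈ [0, 208900)
    rw [if_pos (by omega : s > 0), if_neg (by omega : ¬ s < 10000),
      if_pos (by omega : s < 218900), loop5_529000,
      if_neg (by omega : ¬ s ≤ 0), if_pos (by omega : (10000:Int) ≤ s ∧ s < 218900)]
    simp only []
    rw [PySem.List.pyRange_one_append (s - 10000) 208900 3554900 (by omega) (by omega),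
      PySem.List.pyRange_one_append 208900 238900 3554900 (by omega) (by omega),
      PySem.List.pyRange_one_append 238900 674900 3554900 (by omega) (by omega),
      PySem.List.pyRange_one_append 674900 2954900 3554900 (by omega) (by omega),
      List.map_append, List.map_append, List.map_append, List.map_append,
      map_unrank_chunk (s - 10000) 208900 10000
        (fun x h1 h2 => by unfold getShopIdUnrank; rw [if_pos (by omega)]),
      map_unrank_chunk 208900 238900 320100
        (fun x h1 h2 => by unfold getShopIdUnrank; rw [if_neg (by omega), if_pos (by omega)]),
      map_unrank_chunk 238900 674900 325100
        (fun x h1 h2 => by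
          unfold getShopIdUnrank
          rw [if_neg (by omega), if_neg (by omega), if_pos (by omega)]),
      map_unrank_chunk 674900 2954900 9325100
        (fun x h1 h2 => by
          unfold getShopIdUnrank
          rw [if_neg (by omega), if_neg (by omega), if_neg (by omega), if_pos (by omega)]),
      map_unrank_chunk 2954900 3554900 997045100
        (fun x h1 h2 => by
          unfold getShopIdUnrank
          rw [if_neg (by omega), if_neg (by omega), if_neg (by omega), if_neg (by omega)])]
    have hs : s - 10000 + 10000 = s := by ring
    rw [hs]
    norm_num [List.append_assoc]
  · -- s ∈ [529000, 559000), rank s - 320100 ∈ [208900, 238900)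
    rw [if_pos (by omega : s > 0), if_neg (by omega : ¬ s < 10000),
      if_neg (by omega : ¬ s < 218900),
      if_pos (by omega : (529000:Int) ≤ s ∧ s < 559000), loop5_564000,
      if_neg (by omega : ¬ s ≤ 0), if_neg (by omega : ¬ ((10000:Int) ≤ s ∧ s < 218900)),
      if_pos (by omega : (529000:Int) ≤ s ∧ s < 559000)]
    simp only []
    rw [PySem.List.pyRange_one_append (s - 320100) 238900 3554900 (by omega) (by omega),
      PySem.List.pyRange_one_append 238900 674900 3554900 (by omega) (by omega),
      PySem.List.pyRange_one_append 674900 2954900 3554900 (by omega) (by omega),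
      List.map_append, List.map_append, List.map_append,
      map_unrank_chunk (s - 320100) 238900 320100
        (fun x h1 h2 => by unfold getShopIdUnrank; rw [if_neg (by omega), if_pos (by omega)]),
      map_unrank_chunk 238900 674900 325100
        (fun x h1 h2 => by
          unfold getShopIdUnrank
          rw [if_neg (by omega), if_neg (by omega), if_pos (by omega)]),
      map_unrank_chunk 674900 2954900 9325100
        (fun x h1 h2 => by
          unfold getShopIdUnrank
          rw [if_neg (by omega), if_neg (by omega), if_neg (by omega), if_pos (by omega)]),
      map_unrank_chunk 2954900 3554900 997045100
        (fun x h1 h2 => by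
          unfold getShopIdUnrank
          rw [if_neg (by omega), if_neg (by omega), if_neg (by omega), if_neg (by omega)])]
    have hs : s - 320100 + 320100 = s := by ring
    rw [hs]
    norm_num [List.append_assoc]
  · -- s ∈ [564000, 1000000), rank s - 325100 ∈ [238900, 674900)
    rw [if_pos (by omega : s > 0), if_neg (by omega : ¬ s < 10000),
      if_neg (by omega : ¬ s < 218900),
      if_neg (by omega : ¬ ((529000:Int) ≤ s ∧ s < 559000)),
      if_pos (by omega : (564000:Int) ≤ s ∧ s < 1000000), loop5_1e7,
      if_neg (by omega : ¬ s ≤ 0), if_neg (by omega : ¬ ((10000:Int) ≤ s ∧ s < 218900)),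
      if_neg (by omega : ¬ ((529000:Int) ≤ s ∧ s < 559000)),
      if_pos (by omega : (564000:Int) ≤ s ∧ s < 1000000)]
    simp only []
    rw [PySem.List.pyRange_one_append (s - 325100) 674900 3554900 (by omega) (by omega),
      PySem.List.pyRange_one_append 674900 2954900 3554900 (by omega) (by omega),
      List.map_append, List.map_append,
      map_unrank_chunk (s - 325100) 674900 325100
        (fun x h1 h2 => by
          unfold getShopIdUnrank
          rw [if_neg (by omega), if_neg (by omega), if_pos (by omega)]),
      map_unrank_chunk 674900 2954900 9325100
        (fun x h1 h2 => by
          unfold getShopIdUnrank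
          rw [if_neg (by omega), if_neg (by omega), if_neg (by omega), if_pos (by omega)]),
      map_unrank_chunk 2954900 3554900 997045100
        (fun x h1 h2 => by
          unfold getShopIdUnrank
          rw [if_neg (by omega), if_neg (by omega), if_neg (by omega), if_neg (by omega)])]
    have hs : s - 325100 + 325100 = s := by ring
    rw [hs]
    norm_num [List.append_assoc]
  · -- s ∈ [10000000, 12280000), rank s - 9325100 ∈ [674900, 2954900)
    rw [if_pos (by omega : s > 0), if_neg (by omega : ¬ s < 10000),
      if_neg (by omega : ¬ s < 218900),
      if_neg (by omega : ¬ ((529000:Int) ≤ s ∧ s < 559000)),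
      if_neg (by omega : ¬ ((564000:Int) ≤ s ∧ s < 1000000)),
      if_pos (by omega : (10000000:Int) ≤ s ∧ s < 12280000), loop4_1e9,
      if_neg (by omega : ¬ s ≤ 0), if_neg (by omega : ¬ ((10000:Int) ≤ s ∧ s < 218900)),
      if_neg (by omega : ¬ ((529000:Int) ≤ s ∧ s < 559000)),
      if_neg (by omega : ¬ ((564000:Int) ≤ s ∧ s < 1000000)),
      if_pos (by omega : (10000000:Int) ≤ s ∧ s < 12280000)]
    simp only []
    rw [PySem.List.pyRange_one_append (s - 9325100) 2954900 3554900 (by omega) (by omega),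
      List.map_append,
      map_unrank_chunk (s - 9325100) 2954900 9325100
        (fun x h1 h2 => by
          unfold getShopIdUnrank
          rw [if_neg (by omega), if_neg (by omega), if_neg (by omega), if_pos (by omega)]),
      map_unrank_chunk 2954900 3554900 997045100
        (fun x h1 h2 => by
          unfold getShopIdUnrank
          rw [if_neg (by omega), if_neg (by omega), if_neg (by omega), if_neg (by omega)])]
    have hs : s - 9325100 + 9325100 = s := by ring
    rw [hs]
    norm_num [List.append_assoc]
  · -- s ∈ [1000000000, 1000600000), rank s - 997045100 ∈ [2954900, 3554900)
    rw [if_pos (by omega : s > 0), if_neg (by omega : ¬ s < 10000),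
      if_neg (by omega : ¬ s < 218900),
      if_neg (by omega : ¬ ((529000:Int) ≤ s ∧ s < 559000)),
      if_neg (by omega : ¬ ((564000:Int) ≤ s ∧ s < 1000000)),
      if_neg (by omega : ¬ ((10000000:Int) ≤ s ∧ s < 12280000)),
      if_pos (by omega : (1000000000:Int) ≤ s ∧ s < 1000600000), loop5_neg,
      if_neg (by omega : ¬ s ≤ 0), if_neg (by omega : ¬ ((10000:Int) ≤ s ∧ s < 218900)),
      if_neg (by omega : ¬ ((529000:Int) ≤ s ∧ s < 559000)),
      if_neg (by omega : ¬ ((564000:Int) ≤ s ∧ s < 1000000)),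
      if_neg (by omega : ¬ ((10000000:Int) ≤ s ∧ s < 12280000)),
      if_pos (by omega : (1000000000:Int) ≤ s ∧ s < 1000600000)]
    simp only []
    rw [map_unrank_chunk (s - 997045100) 3554900 997045100
        (fun x h1 h2 => by
          unfold getShopIdUnrank
          rw [if_neg (by omega), if_neg (by omega), if_neg (by omega), if_neg (by omega)])]
    have hs : s - 997045100 + 997045100 = s := by ring
    rw [hs]
    norm_num
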